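-- pv_equiv track=rewrite | github.com/koki-ota0/atcoder_test | count_words.py | solve
-- ===== SOURCE A (Python) =====
-- def solve(S):
--     a = []
--     n = len(S)
--     if n == 2:
--         return [S]
--     else:
--         for i in range(n):
--             if S[:i]+S[i+1:] not in a:
--                 a += solve(S[:i]+S[i+1:]) + [S[:i]+S[i+1:]]
--         return a
-- ===== SOURCE B (Python) =====
-- def solve(S):
--     # Top-down memoization: solve is a pure function of its string argument,
--     # so each distinct substring's result is computed once and reused.
--     memo = {}
--
--     def go(s):
--         r = memo.get(s)
--         if r is not None:
--             return r
--         n = len(s)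
--         if n == 2:
--             r = [s]
--         else:
--             r = []
--             for i in range(n):
--                 t = s[:i] + s[i + 1:]
--                 if t not in r:
--                     r += go(t) + [t]
--         memo[s] = r
--         return r
--
--     return go(S)
-- ===== Notes on version B (the rewrite author's own statement) =====
-- stated objective: alternative
-- what changed: B memoizes the recursion with a dict keyed by the string argument (solve is pure), so each distinct deletion-substring is solved once instead of once per path in the call tree.
import Mathlib
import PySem

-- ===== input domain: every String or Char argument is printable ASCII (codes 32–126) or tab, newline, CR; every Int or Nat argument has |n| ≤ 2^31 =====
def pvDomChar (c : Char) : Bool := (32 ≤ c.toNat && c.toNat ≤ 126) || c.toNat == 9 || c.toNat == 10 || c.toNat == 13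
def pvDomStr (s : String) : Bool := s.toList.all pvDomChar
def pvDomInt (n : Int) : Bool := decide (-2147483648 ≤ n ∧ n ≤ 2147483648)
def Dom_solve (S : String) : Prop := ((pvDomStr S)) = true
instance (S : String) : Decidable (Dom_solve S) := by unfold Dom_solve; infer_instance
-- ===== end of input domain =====

-- B memoizes the pure recursion with a dict keyed by the string argument, so each distinct substring is solved once.


-- ===== PORT A =====
-- s[:i] + s[i+1:]  (shared between both ports; exact via PySem slices)
def pvDel (s : List Char) (i : Nat) : List Char :=
  PySem.List.slice s none (some (i : Int)) ++ PySem.List.slice s (some ((i : Int) + 1)) none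

-- length fact the termination proofs cite
theorem pvDel_length (s : List Char) (i : Nat) (h : i < s.length) :
    (pvDel s i).length = s.length - 1 := by
  have h1 : ((i : Int) + 1) = ((i + 1 : Nat) : Int) := by push_cast; ring
  rw [pvDel, h1, PySem.List.slice_to_natCast, PySem.List.slice_from_natCast]
  rw [List.length_append, List.length_take, List.length_drop]
  omega

mutual
-- the 'for i in range(n)' loop of A, with accumulator a
def solveGo (s : List Char) (i : Nat) (a : List (List Char)) : List (List Char) :=
  if h : i < s.length then
    let t := pvDel s i
    if t ∈ a then solveGo s (i + 1) a
    else solveGo s (i + 1) (a ++ solveL t ++ [t])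
  else a
termination_by (s.length, s.length + 1 - i)
decreasing_by
  · exact Prod.Lex.right _ (by omega)
  · exact Prod.Lex.left _ _ (by rw [pvDel_length s i h]; omega)
  · exact Prod.Lex.right _ (by omega)

def solveL (s : List Char) : List (List Char) :=
  if s.length = 2 then [s] else solveGo s 0 []
termination_by (s.length, s.length + 2)
decreasing_by
  exact Prod.Lex.right _ (by omega)
end

def solve (S : String) : List String := (solveL S.toList).map String.ofList

-- ===== PORT B =====
mutual
-- go(s) with the memo dict threaded through
def goAlt (s : List Char) (memo : PySem.Dict (List Char) (List (List Char))) :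
    List (List Char) × PySem.Dict (List Char) (List (List Char)) :=
  match PySem.Dict.get? memo s with
  | some r => (r, memo)
  | none =>
    if s.length = 2 then
      let r := [s]
      (r, PySem.Dict.insert memo s r)
    else
      let p := goLoopAlt s 0 [] memo
      (p.1, PySem.Dict.insert p.2 s p.1)
termination_by (s.length, s.length + 2)
decreasing_by
  exact Prod.Lex.right _ (by omega)

-- B's 'for i in range(n)' loop: accumulator r and the memo dict
def goLoopAlt (s : List Char) (i : Nat) (r : List (List Char))
    (memo : PySem.Dict (List Char) (List (List Char))) :
    List (List Char) × PySem.Dict (List Char) (List (List Char)) :=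
  if h : i < s.length then
    let t := pvDel s i
    if t ∈ r then goLoopAlt s (i + 1) r memo
    else
      let p := goAlt t memo
      goLoopAlt s (i + 1) (r ++ p.1 ++ [t]) p.2
  else (r, memo)
termination_by (s.length, s.length + 1 - i)
decreasing_by
  · exact Prod.Lex.right _ (by omega)
  · exact Prod.Lex.left _ _ (by rw [pvDel_length s i h]; omega)
  · exact Prod.Lex.right _ (by omega)
end

def solve_alt (S : String) : List String :=
  ((goAlt S.toList PySem.Dict.empty).1).map String.ofList

-- ===== PRECONDITION & SPEC =====
def Spec_solve (S : String) (out : List String) : Prop := out = solve_alt S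
instance (S : String) (out : List String) : Decidable (Spec_solve S out) := by unfold Spec_solve; infer_instance

-- ===== CLAIM (what is proved, stated in full; the proofs are below) =====
def Claim_equal_solve : Prop := ∀ (S : String), Dom_solve S → Spec_solve S (solve S)

-- ===== LEMMAS AND PROOFS =====
-- memo invariant: every cached value is the (unmemoized) result for its key
def InvMemo (m : PySem.Dict (List Char) (List (List Char))) : Prop :=
  ∀ k r, PySem.Dict.get? m k = some r → r = solveL k

theorem invMemo_empty : InvMemo PySem.Dict.empty := by
  intro k r h
  simp [PySem.Dict.get?_empty] at h

theorem invMemo_insert (m : PySem.Dict (List Char) (List (List Char))) (k : List Char)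
    (hm : InvMemo m) :
    InvMemo (PySem.Dict.insert m k (solveL k)) := by
  intro k' r hr
  rw [PySem.Dict.get?_insert] at hr
  split at hr
  · cases hr; simp [*]
  · exact hm k' r hr

theorem goLoopAlt_spec (s : List Char)
    (IH : ∀ t, t.length < s.length → ∀ memo, InvMemo memo →
      (goAlt t memo).1 = solveL t ∧ InvMemo (goAlt t memo).2) :
    ∀ (j i : Nat) (r : List (List Char)) memo, s.length ≤ i + j → InvMemo memo →
      (goLoopAlt s i r memo).1 = solveGo s i r ∧ InvMemo (goLoopAlt s i r memo).2 := by
  intro j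
  induction j with
  | zero =>
    intro i r memo hle hinv
    have hni : ¬ i < s.length := by omega
    rw [goLoopAlt, solveGo]
    simp [hni, hinv]
  | succ j ih =>
    intro i r memo hle hinv
    by_cases hi : i < s.length
    · rw [goLoopAlt, solveGo]
      simp only [hi, dif_pos]
      by_cases hmem : pvDel s i ∈ r
      · simp only [hmem, if_pos]
        exact ih (i + 1) r memo (by omega) hinv
      · simp only [hmem, if_neg, not_false_iff]
        have ht : (pvDel s i).length < s.length := by
          rw [pvDel_length s i hi]; omega
        obtain ⟨h1, h2⟩ := IH (pvDel s i) ht memo hinv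
        rw [h1]
        exact ih (i + 1) (r ++ solveL (pvDel s i) ++ [pvDel s i])
          (goAlt (pvDel s i) memo).2 (by omega) h2
    · rw [goLoopAlt, solveGo]
      simp [hi, hinv]

theorem goAlt_step (s : List Char)
    (IH : ∀ t, t.length < s.length → ∀ memo, InvMemo memo →
      (goAlt t memo).1 = solveL t ∧ InvMemo (goAlt t memo).2) :
    ∀ memo, InvMemo memo →
      (goAlt s memo).1 = solveL s ∧ InvMemo (goAlt s memo).2 := by
  intro memo hinv
  rw [goAlt]
  cases hget : PySem.Dict.get? memo s with
  | some r =>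
    simp only []
    exact ⟨hinv s r hget, hinv⟩
  | none =>
    simp only []
    by_cases h2 : s.length = 2
    · constructor
      · simp [h2, solveL]
      · simp only [h2, if_pos]
        have : solveL s = [s] := by rw [solveL]; simp [h2]
        rw [← this]
        exact invMemo_insert memo s hinv
    · obtain ⟨hl1, hl2⟩ := goLoopAlt_spec s IH s.length 0 [] memo (by omega) hinv
      constructor
      · simp only [h2, if_neg, not_false_iff]
        rw [hl1, solveL]
        simp [h2]
      · simp only [h2, if_neg, not_false_iff]
        have hv : (goLoopAlt s 0 [] memo).1 = solveL s := by
          rw [hl1, solveL]; simp [h2]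
        rw [hv]
        exact invMemo_insert _ s hl2

theorem goAlt_spec : ∀ (n : Nat) (s : List Char), s.length ≤ n → ∀ memo, InvMemo memo →
    (goAlt s memo).1 = solveL s ∧ InvMemo (goAlt s memo).2 := by
  intro n
  induction n with
  | zero =>
    intro s hs memo hinv
    exact goAlt_step s (fun t ht => by omega) memo hinv
  | succ n ih =>
    intro s hs memo hinv
    exact goAlt_step s (fun t ht memo' hinv' => ih t (by omega) memo' hinv') memo hinv

-- ===== VERDICT (by name: the statement is the Claim_ definition above) =====
theorem solve_spec : Claim_equal_solve := by
  intro S _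
  unfold Spec_solve solve solve_alt
  have := goAlt_spec S.toList.length S.toList (le_refl _) PySem.Dict.empty invMemo_empty
  rw [this.1]
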